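-- pv_equiv track=rewrite | github.com/hzhe0083-source/RoboClaw | roboclaw/data/curation/exports.py | _build_task_index
-- ===== SOURCE A (Python) =====
-- def _build_task_index(episode_to_task: dict[int, str]) -> tuple[dict[str, int], list[str]]:
--     task_to_index: dict[str, int] = {}
--     task_list: list[str] = []
--     for episode_index in sorted(episode_to_task):
--         task = episode_to_task[episode_index]
--         if task in task_to_index:
--             continue
--         task_to_index[task] = len(task_list)
--         task_list.append(task)
--     return task_to_index, task_list
-- ===== SOURCE B (Python) =====
-- def _build_task_index(episode_to_task):
--     # Map each task to its smallest episode index, then order tasks by that minimum: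
--     # the first-occurrence order over sorted keys is exactly ascending minimal key.
--     first_key = {}
--     for episode_index, task in episode_to_task.items():
--         if task not in first_key or episode_index < first_key[task]:
--             first_key[task] = episode_index
--     task_list = sorted(first_key, key=first_key.__getitem__)
--     return {task: i for i, task in enumerate(task_list)}, task_list
-- ===== Notes on version B (the rewrite author's own statement) =====
-- stated objective: alternative
-- what changed: Instead of scanning all keys in sorted order and deduplicating the task stream, B makes one unsorted pass computing each distinct task's minimal episode index and then sorts only the distinct tasks by that minimum (first occurrence over sorted keys = ascending minimal key).
import Mathlib
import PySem

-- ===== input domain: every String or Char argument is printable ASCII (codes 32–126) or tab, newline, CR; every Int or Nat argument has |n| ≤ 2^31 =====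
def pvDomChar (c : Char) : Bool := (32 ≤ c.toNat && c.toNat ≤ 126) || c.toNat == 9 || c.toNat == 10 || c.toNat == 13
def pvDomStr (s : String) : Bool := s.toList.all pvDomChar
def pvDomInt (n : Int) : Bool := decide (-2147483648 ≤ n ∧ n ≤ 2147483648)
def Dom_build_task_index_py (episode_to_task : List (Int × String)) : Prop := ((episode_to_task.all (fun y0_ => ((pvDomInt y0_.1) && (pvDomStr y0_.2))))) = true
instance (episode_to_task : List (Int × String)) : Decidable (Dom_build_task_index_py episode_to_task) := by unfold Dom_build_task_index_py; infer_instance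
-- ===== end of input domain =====

-- B replaces A's scan of all keys in sorted order with: one unsorted pass computing each
-- distinct task's minimal episode index, then a sort of only the distinct tasks by that
-- minimum; objective: alternative algorithm.


-- ===== PORT A =====
-- episode_to_task[episode_index] is ported as getD with default "": episode_index always comes
-- from the dict's own keys, so the default is never reached and the lookup is exact (no KeyError).
def build_task_index_py (episode_to_task : List (Int × String)) : (List (String × Int)) × List String :=
  let d := PySem.Dict.ofList episode_to_task
  let r := (PySem.List.sorted d.keys (fun x => x) false).foldl
    (fun (acc : PySem.Dict String Int × List String) episode_index =>
      let task := d.getD episode_index ""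
      if acc.1.contains task then acc
      else (acc.1.insert task ((acc.2.length : Int)), acc.2 ++ [task]))
    (PySem.Dict.empty, [])
  (r.1.items, r.2)

-- ===== PORT B =====
-- first_key[task] lookup inside the loop is ported as getD with default 0: it is only reached
-- when 'task in first_key' holds (the left disjunct is false), so the default is never used.
def build_task_index_py_alt (episode_to_task : List (Int × String)) : (List (String × Int)) × List String :=
  let d := PySem.Dict.ofList episode_to_task
  let first_key := d.items.foldl
    (fun (fk : PySem.Dict String Int) p =>
      if ¬ fk.contains p.2 ∨ p.1 < fk.getD p.2 0 then fk.insert p.2 p.1 else fk)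
    PySem.Dict.empty
  let task_list := PySem.List.sorted first_key.keys (fun t => first_key.getD t 0) false
  ((PySem.List.enumerate task_list 0).map (fun p => (p.2, p.1)), task_list)

-- ===== PRECONDITION & SPEC =====
def Spec_build_task_index_py (episode_to_task : List (Int × String)) (out : (List (String × Int)) × List String) : Prop := out = build_task_index_py_alt episode_to_task
instance (episode_to_task : List (Int × String)) (out : (List (String × Int)) × List String) : Decidable (Spec_build_task_index_py episode_to_task out) := by unfold Spec_build_task_index_py; infer_instance

-- ===== CLAIM (what is proved, stated in full; the proofs are below) =====
def Claim_equal_build_task_index_py : Prop := ∀ (episode_to_task : List (Int × String)), Dom_build_task_index_py episode_to_task → Spec_build_task_index_py episode_to_task (build_task_index_py episode_to_task)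

-- ===== LEMMAS AND PROOFS =====

-- The index map both sides return, as a function of the task list.
def pvItemsOf (lst : List String) : List (String × Int) :=
  (PySem.List.enumerate lst 0).map (fun p => (p.2, p.1))

lemma pvItemsOf_append_singleton (lst : List String) (t : String) :
    pvItemsOf (lst ++ [t]) = pvItemsOf lst ++ [(t, (lst.length : Int))] := by
  simp [pvItemsOf, PySem.List.enumerate_append, PySem.List.enumerate_cons]

lemma pvKeys_itemsOf (lst : List String) :
    (PySem.Dict.mk (pvItemsOf lst)).keys = lst := by
  simp [PySem.Dict.keys, pvItemsOf, Function.comp_def, PySem.List.map_snd_enumerate]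

lemma pvContains_itemsOf (lst : List String) (t : String) :
    (PySem.Dict.mk (pvItemsOf lst)).contains t = lst.contains t := by
  rw [PySem.Dict.contains_eq_decide_mem_keys, pvKeys_itemsOf]
  simp

-- A's loop, run from a state whose dict indexes the current list, ends in the same shape with
-- the list extended exactly as Python's set/dedup extension (PySem.Set.update).
lemma pvLoopA (ts : List String) : ∀ (lst : List String),
    ts.foldl
      (fun (acc : PySem.Dict String Int × List String) t =>
        if acc.1.contains t then acc
        else (acc.1.insert t ((acc.2.length : Int)), acc.2 ++ [t]))
      (PySem.Dict.mk (pvItemsOf lst), lst)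
    = (PySem.Dict.mk (pvItemsOf (PySem.Set.update lst ts)), PySem.Set.update lst ts) := by
  induction ts with
  | nil => intro lst; simp [PySem.Set.update]
  | cons t ts ih =>
    intro lst
    simp only [List.foldl_cons, PySem.Set.update, pvContains_itemsOf]
    by_cases hm : t ∈ lst
    · simpa [hm, PySem.Set.add] using ih lst
    · have hins : (PySem.Dict.mk (pvItemsOf lst)).insert t ((lst.length : Int))
          = PySem.Dict.mk (pvItemsOf (lst ++ [t])) := by
        apply PySem.Dict.ext
        rw [PySem.Dict.items_insert_of_not_contains]
        · simp [pvItemsOf_append_singleton]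
        · rw [pvContains_itemsOf]; simp [hm]
      simpa [hm, PySem.Set.add, hins] using ih (lst ++ [t])

-- B-side: the running-minimum step on an optional accumulator.
def pvMStep (o : Option Int) (k : Int) : Option Int :=
  some (match o with | none => k | some m => min m k)

lemma pvMStep_some (a k : Int) : pvMStep (some a) k = some (min a k) := rfl

lemma pvMFold_some (l : List Int) : ∀ a : Int,
    l.foldl pvMStep (some a) = some (l.foldl min a) := by
  induction l with
  | nil => intro a; rfl
  | cons k l ih => intro a; simp only [List.foldl_cons, pvMStep_some]; exact ih (min a k)

-- B's loop computes, at every key t, the running minimum of the episode indices whose task is t.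
lemma pvFkGet (l : List (Int × String)) : ∀ (fk0 : PySem.Dict String Int) (t : String),
    (l.foldl
      (fun (fk : PySem.Dict String Int) p =>
        if ¬ fk.contains p.2 ∨ p.1 < fk.getD p.2 0 then fk.insert p.2 p.1 else fk)
      fk0).get? t
    = ((l.filter (fun p => p.2 == t)).map (fun p => p.1)).foldl pvMStep (fk0.get? t) := by
  induction l with
  | nil => intro fk0 t; rfl
  | cons p l ih =>
    intro fk0 t
    by_cases hst : p.2 = t
    · subst hst
      simp only [List.foldl_cons, List.filter_cons, beq_self_eq_true, if_pos, List.map_cons]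
      cases hg : fk0.get? p.2 with
      | none =>
        have hc : fk0.contains p.2 = false := by
          rw [PySem.Dict.contains_eq_isSome_get?, hg]; rfl
        rw [if_pos (Or.inl (by simp [hc]))]
        rw [ih, PySem.Dict.get?_insert_self]
        rfl
      | some m =>
        have hc : fk0.contains p.2 = true := by
          rw [PySem.Dict.contains_eq_isSome_get?, hg]; rfl
        have hgd : fk0.getD p.2 0 = m := by
          rw [PySem.Dict.getD_eq_get?_getD, hg]; rfl
        by_cases hlt : p.1 < m
        · rw [if_pos (Or.inr (by rw [hgd]; exact hlt))]
          rw [ih, PySem.Dict.get?_insert_self]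
          have : pvMStep (some m) p.1 = some p.1 := by
            simp [pvMStep_some, min_eq_right (le_of_lt hlt)]
          rw [this]
        · have hcond : ¬ (¬ fk0.contains p.2 = true ∨ p.1 < fk0.getD p.2 0) := by
            rw [hgd]; simp [hc, hlt]
          rw [if_neg hcond, ih, hg]
          have : pvMStep (some m) p.1 = some m := by
            simp [pvMStep_some, min_eq_left (not_lt.mp hlt)]
          rw [this]
    · have hb : (p.2 == t) = false := by simp [hst]
      simp only [List.foldl_cons, List.filter_cons, hb, Bool.false_eq_true, if_false]
      rw [ih]
      congr 1
      by_cases hcond : ¬ fk0.contains p.2 = true ∨ p.1 < fk0.getD p.2 0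
      · rw [if_pos hcond, PySem.Dict.get?_insert_of_ne _ _ (fun h => hst h.symm)]
      · rw [if_neg hcond]

-- B's loop collects as keys exactly the distinct tasks, in first-appearance order.
lemma pvFkKeys (l : List (Int × String)) : ∀ (fk0 : PySem.Dict String Int),
    (l.foldl
      (fun (fk : PySem.Dict String Int) p =>
        if ¬ fk.contains p.2 ∨ p.1 < fk.getD p.2 0 then fk.insert p.2 p.1 else fk)
      fk0).keys
    = PySem.Set.update fk0.keys (l.map (fun p => p.2)) := by
  induction l with
  | nil => intro fk0; rfl
  | cons p l ih =>
    intro fk0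
    simp only [List.foldl_cons, List.map_cons, PySem.Set.update_cons]
    by_cases hc : fk0.contains p.2 = true
    · have hmem : p.2 ∈ fk0.keys := (PySem.Dict.contains_iff_mem_keys fk0 p.2).mp hc
      have hadd : PySem.Set.add fk0.keys p.2 = fk0.keys := PySem.Set.add_of_mem hmem
      by_cases hcond : ¬ fk0.contains p.2 = true ∨ p.1 < fk0.getD p.2 0
      · rw [if_pos hcond, ih, PySem.Dict.keys_insert_of_contains _ _ hc, hadd]
      · rw [if_neg hcond, ih, hadd]
    · have hcf : fk0.contains p.2 = false := by simpa using hc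
      have hnm : p.2 ∉ fk0.keys := fun h => hc ((PySem.Dict.contains_iff_mem_keys fk0 p.2).mpr h)
      rw [if_pos (Or.inl hc), ih, PySem.Dict.keys_insert_of_not_contains _ _ hcf,
        PySem.Set.add_of_not_mem hnm]

-- The crux: over a strictly increasing key list, the first-occurrence order of the values is
-- exactly the ascending order of each value's minimal key.
lemma pvCrux (v : Int → String) : ∀ (ks : List Int), ks.Pairwise (· < ·) →
    (PySem.Set.ofList (ks.map v)).Pairwise (fun a b => ∀ ma mb : Int,
      (ma ∈ ks ∧ v ma = a ∧ ∀ x ∈ ks, v x = a → ma ≤ x) →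
      (mb ∈ ks ∧ v mb = b ∧ ∀ x ∈ ks, v x = b → mb ≤ x) → ma < mb) := by
  intro ks
  induction ks with
  | nil => intro _; simp [PySem.Set.ofList]
  | cons k ks ih =>
    intro hp
    obtain ⟨hk, hp'⟩ := List.pairwise_cons.mp hp
    rw [List.map_cons, PySem.Set.ofList_cons]
    refine List.Pairwise.cons ?_ ?_
    · -- head vs all later distinct values
      intro b hb ma mb ⟨hma, hva, hmina⟩ ⟨hmb, hvb, _⟩
      have hbne : b ≠ v k := by
        exact ((PySem.Set.mem_discard _ _ _).mp hb).2
      have hma_eq : ma = k := by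
        rcases List.mem_cons.mp hma with h | h
        · exact h
        · exact absurd (hmina k List.mem_cons_self rfl) (not_le.mpr (hk ma h))
      have hmb_ne : mb ≠ k := fun h => hbne (by rw [← hvb, h])
      have hmb_mem : mb ∈ ks := (List.mem_cons.mp hmb).resolve_left hmb_ne
      rw [hma_eq]
      exact hk mb hmb_mem
    · -- tail: discard is a sublist of the dedup of the tail, where the IH applies
      have base := ih hp'
      have hsub : ((PySem.Set.ofList (ks.map v)).discard (v k)).Sublist
          (PySem.Set.ofList (ks.map v)) := by
        simp only [PySem.Set.discard]
        exact List.filter_sublist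
      have tail := base.sublist hsub
      refine tail.imp_of_mem ?_
      intro a b ha hb hrel ma mb ⟨hma, hva, hmina⟩ ⟨hmb, hvb, hminb⟩
      have hane : a ≠ v k := ((PySem.Set.mem_discard _ _ _).mp ha).2
      have hbne : b ≠ v k := ((PySem.Set.mem_discard _ _ _).mp hb).2
      have hma_ne : ma ≠ k := fun h => hane (by rw [← hva, h])
      have hmb_ne : mb ≠ k := fun h => hbne (by rw [← hvb, h])
      exact hrel ma mb
        ⟨(List.mem_cons.mp hma).resolve_left hma_ne, hva,
          fun x hx hvx => hmina x (List.mem_cons_of_mem _ hx) hvx⟩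
        ⟨(List.mem_cons.mp hmb).resolve_left hmb_ne, hvb,
          fun x hx hvx => hminb x (List.mem_cons_of_mem _ hx) hvx⟩

-- ===== VERDICT (by name: the statement is the Claim_ definition above) =====
theorem build_task_index_py_spec : Claim_equal_build_task_index_py := by
  intro e _
  unfold Spec_build_task_index_py build_task_index_py build_task_index_py_alt
  simp only []
  set d := PySem.Dict.ofList e with hd
  have hnd : d.keys.Nodup := PySem.Dict.nodup_keys_ofList e
  set ks := PySem.List.sorted d.keys (fun x => x) false with hks
  have hperm : ks.Perm d.keys := PySem.List.sorted_perm d.keys (fun x => x) false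
  have hks_nodup : ks.Nodup := hperm.nodup_iff.mpr hnd
  have hks_lt : ks.Pairwise (· < ·) := by
    have h1 : ks.Pairwise (fun a b : Int => a ≤ b) := PySem.List.sorted_pairwise d.keys (fun x => x)
    exact (h1.and hks_nodup).imp (fun h => lt_of_le_of_ne h.1 h.2)
  set v : Int → String := fun k => d.getD k "" with hv
  -- items ↔ keys correspondence
  have hkey_item : ∀ k ∈ d.keys, (k, v k) ∈ d.items := by
    intro k hkmem
    have hne : d.get? k ≠ none := fun h =>
      ((PySem.Dict.get?_eq_none_iff_not_mem_keys d k).mp h) hkmem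
    obtain ⟨w, hw⟩ := Option.ne_none_iff_exists'.mp hne
    have hvd : v k = w := by rw [hv]; exact PySem.Dict.getD_of_get?_eq_some d "" hw
    rw [hvd]
    exact (PySem.Dict.get?_eq_some_iff_mem_items d k w hnd).mp hw
  have hitem_get : ∀ p ∈ d.items, d.get? p.1 = some p.2 := by
    intro p hp
    exact (PySem.Dict.get?_eq_some_iff_mem_items d p.1 p.2 hnd).mpr hp
  have hitem_v : ∀ p ∈ d.items, v p.1 = p.2 := by
    intro p hp
    rw [hv]; exact PySem.Dict.getD_of_get?_eq_some d "" (hitem_get p hp)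
  -- the filtered key list of a task
  have hik : ∀ (x : Int) (t : String),
      x ∈ (d.items.filter (fun p => p.2 == t)).map (fun p => p.1) ↔ x ∈ d.keys ∧ v x = t := by
    intro x t
    constructor
    · intro hx
      obtain ⟨p, hpmem, hpx⟩ := List.mem_map.mp hx
      obtain ⟨hpitems, hpt⟩ := List.mem_filter.mp hpmem
      have hpt' : p.2 = t := by simpa using hpt
      refine ⟨?_, ?_⟩
      · rw [← hpx]; exact PySem.Dict.mem_keys_of_mem_items d hpitems
      · rw [← hpx, hitem_v p hpitems, hpt']
    · intro ⟨hxk, hxv⟩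
      refine List.mem_map.mpr ⟨(x, v x), List.mem_filter.mpr ⟨hkey_item x hxk, by simp [hxv]⟩, rfl⟩
  -- the B-side dict
  set fk := d.items.foldl
    (fun (fkd : PySem.Dict String Int) p =>
      if ¬ fkd.contains p.2 ∨ p.1 < fkd.getD p.2 0 then fkd.insert p.2 p.1 else fkd)
    PySem.Dict.empty with hfk
  have hfk_keys : fk.keys = PySem.Set.ofList (d.items.map (fun p => p.2)) := by
    rw [hfk, pvFkKeys, PySem.Dict.keys_empty, PySem.Set.update_nil_left]
  have hfk_get : ∀ t, fk.get? t
      = ((d.items.filter (fun p => p.2 == t)).map (fun p => p.1)).foldl pvMStep none := by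
    intro t
    rw [hfk, pvFkGet, PySem.Dict.get?_empty]
  -- the A-side list
  set L := PySem.Set.ofList (ks.map v) with hL
  -- same membership on both sides
  have hmemLR : ∀ t : String, t ∈ ks.map v ↔ t ∈ d.items.map (fun p => p.2) := by
    intro t
    constructor
    · intro ht
      obtain ⟨k, hkmem, hkv⟩ := List.mem_map.mp ht
      exact List.mem_map.mpr ⟨(k, v k), hkey_item k (hperm.mem_iff.mp hkmem), hkv⟩
    · intro ht
      obtain ⟨p, hpmem, hpv⟩ := List.mem_map.mp ht
      refine List.mem_map.mpr ⟨p.1, hperm.mem_iff.mpr (PySem.Dict.mem_keys_of_mem_items d hpmem), ?_⟩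
      rw [hitem_v p hpmem, hpv]
  have hperm_L : L.Perm fk.keys := by
    rw [hL, hfk_keys]
    refine (List.perm_ext_iff_of_nodup (PySem.Set.nodup_ofList _) (PySem.Set.nodup_ofList _)).mpr ?_
    intro t
    rw [PySem.Set.mem_ofList, PySem.Set.mem_ofList]
    exact hmemLR t
  -- each task in L attains the min-key property at fk.getD t 0
  have hPspec : ∀ t ∈ L, (fk.getD t 0) ∈ ks ∧ v (fk.getD t 0) = t ∧
      ∀ x ∈ ks, v x = t → fk.getD t 0 ≤ x := by
    intro t htL
    have htmem : t ∈ d.items.map (fun p => p.2) := (hmemLR t).mp ((PySem.Set.mem_ofList _ _).mp htL)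
    obtain ⟨p, hpmem, hpv⟩ := List.mem_map.mp htmem
    have hpfilter : p.1 ∈ (d.items.filter (fun q => q.2 == t)).map (fun q => q.1) :=
      List.mem_map.mpr ⟨p, List.mem_filter.mpr ⟨hpmem, by simp [hpv]⟩, rfl⟩
    obtain ⟨x, r, hxr⟩ : ∃ x r, (d.items.filter (fun q => q.2 == t)).map (fun q => q.1) = x :: r := by
      cases hfl : (d.items.filter (fun q => q.2 == t)).map (fun q => q.1) with
      | nil => rw [hfl] at hpfilter; simp at hpfilter
      | cons x r => exact ⟨x, r, rfl⟩
    have hget : fk.get? t = some (r.foldl min x) := by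
      rw [hfk_get, hxr, List.foldl_cons]
      show (List.foldl pvMStep (pvMStep none x) r) = _
      have : pvMStep none x = some x := rfl
      rw [this, pvMFold_some]
    set m := r.foldl min x with hm
    have hgd : fk.getD t 0 = m := by
      rw [PySem.Dict.getD_eq_get?_getD, hget]; rfl
    have hmmem : m ∈ (d.items.filter (fun q => q.2 == t)).map (fun q => q.1) := by
      rw [hxr]
      rcases PySem.List.foldl_min_mem r x with h | h
      · rw [hm, h]; exact List.mem_cons_self
      · exact List.mem_cons_of_mem _ h
    have hmle : ∀ y ∈ (d.items.filter (fun q => q.2 == t)).map (fun q => q.1), m ≤ y := by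
      intro y hy
      rw [hxr] at hy
      rcases List.mem_cons.mp hy with h | h
      · rw [h]; exact (PySem.List.foldl_min_le r x).1
      · exact (PySem.List.foldl_min_le r x).2 y h
    obtain ⟨hmk, hmv⟩ := (hik m t).mp hmmem
    rw [hgd]
    refine ⟨hperm.mem_iff.mpr hmk, hmv, ?_⟩
    intro x' hx' hvx'
    exact hmle x' ((hik x' t).mpr ⟨hperm.mem_iff.mp hx', hvx'⟩)
  -- L is sorted strictly by the minimal key
  have hLpair : L.Pairwise (fun a b => fk.getD a 0 < fk.getD b 0) := by
    have base := pvCrux v ks hks_lt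
    rw [← hL] at base
    refine base.imp_of_mem ?_
    intro a b ha hb hrel
    exact hrel (fk.getD a 0) (fk.getD b 0) (hPspec a ha) (hPspec b hb)
  -- hence B's sort returns exactly A's dedup order
  have hsorted : PySem.List.sorted fk.keys (fun t => fk.getD t 0) false = L :=
    PySem.List.sorted_eq_of_perm_of_pairwise_lt fk.keys L (fun t => fk.getD t 0) hperm_L hLpair
  -- finish: A's loop result
  have h0 : (PySem.Dict.empty : PySem.Dict String Int) = PySem.Dict.mk (pvItemsOf []) := rfl
  rw [← List.foldl_map (f := fun i => d.getD i "")
      (g := fun (acc : PySem.Dict String Int × List String) task =>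
        if acc.1.contains task then acc
        else (acc.1.insert task ((acc.2.length : Int)), acc.2 ++ [task]))]
  rw [h0, pvLoopA, hsorted]
  have hupd : PySem.Set.update ([] : List String) (ks.map v) = L := by
    rw [hL, PySem.Set.update_nil_left]
  rw [hupd]
  rfl
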